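-- pv_equiv track=rewrite | github.com/lyshathan/WebServ | var/www/cgi/cgi.py | filter_env_vars
-- ===== SOURCE A (Python) =====
-- def filter_env_vars(env_vars, params):
--     """Filter environment variables based on query parameters."""
--     filtered_vars = env_vars.copy()
--
--     # Handle search parameter
--     search_term = params.get('search', '').lower()
--     if search_term:
--         filtered_vars = {k: v for k, v in filtered_vars.items()
--                         if search_term in k.lower() or search_term in str(v).lower()}
--
--     # Handle filter parameter (filter by key prefix)
--     filter_prefix = params.get('filter', '').upper()
--     if filter_prefix:
--         filtered_vars = {k: v for k, v in filtered_vars.items()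
--                         if k.upper().startswith(filter_prefix)}
--
--     # Handle specific key parameter
--     key_param = params.get('key', '')
--     if key_param:
--         filtered_vars = {k: v for k, v in filtered_vars.items()
--                         if k == key_param}
--
--     return filtered_vars
-- ===== SOURCE B (Python) =====
-- def filter_env_vars(env_vars, params):
--     """Filter environment variables based on query parameters."""
--     search_term = params.get('search', '').lower()
--     filter_prefix = params.get('filter', '').upper()
--     key_param = params.get('key', '')
--
--     def keeps(k, v):
--         if search_term and search_term not in k.lower() and search_term not in str(v).lower():
--             return False
--         if filter_prefix and not k.upper().startswith(filter_prefix):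
--             return False
--         return True
--
--     if key_param:
--         # direct dict lookup: no scan over env_vars needed
--         if key_param in env_vars and keeps(key_param, env_vars[key_param]):
--             return {key_param: env_vars[key_param]}
--         return {}
--     return {k: v for k, v in env_vars.items() if keeps(k, v)}
-- ===== Notes on version B (the rewrite author's own statement) =====
-- stated objective: alternative
-- what changed: When a specific key is requested B answers by one direct dict lookup (checking that single entry against search/prefix) instead of scanning, and otherwise filters in one pass with an early-return predicate helper, replacing A's up-to-three successive dict-rebuilding passes.
import Mathlib
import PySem

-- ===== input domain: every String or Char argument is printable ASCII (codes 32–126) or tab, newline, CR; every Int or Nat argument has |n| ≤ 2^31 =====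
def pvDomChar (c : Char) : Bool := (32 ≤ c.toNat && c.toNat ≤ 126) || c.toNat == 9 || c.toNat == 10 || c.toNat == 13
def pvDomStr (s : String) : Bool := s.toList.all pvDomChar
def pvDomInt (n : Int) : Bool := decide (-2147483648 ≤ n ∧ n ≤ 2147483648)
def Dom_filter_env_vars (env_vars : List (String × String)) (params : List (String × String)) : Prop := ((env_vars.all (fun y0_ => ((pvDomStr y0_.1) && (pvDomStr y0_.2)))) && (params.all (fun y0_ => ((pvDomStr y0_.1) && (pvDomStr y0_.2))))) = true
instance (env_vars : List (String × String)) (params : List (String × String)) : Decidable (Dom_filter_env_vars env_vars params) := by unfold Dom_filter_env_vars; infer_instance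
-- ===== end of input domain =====

-- B: with a 'key' param it does one direct dict lookup instead of scanning; otherwise one filtering pass with an early-return predicate — replacing A's up-to-three successive rebuild passes. (objective: alternative)


-- ===== PORT A =====
-- params.get(k, d) on the association list (first match = dict lookup)
def pvGet (ps : List (String × String)) (k d : String) : String :=
  match ps.find? (fun p => p.1 == k) with
  | some p => p.2
  | none => d

def filter_env_vars (env_vars : List (String × String)) (params : List (String × String)) : List (String × String) :=
  let filtered_vars := env_vars
  let search_term := PySem.Str.lower (pvGet params "search" "")
  let filtered_vars :=
    if search_term ≠ "" then
      filtered_vars.filter (fun kv =>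
        PySem.Str.isIn search_term (PySem.Str.lower kv.1) ||
        PySem.Str.isIn search_term (PySem.Str.lower kv.2))
    else filtered_vars
  let filter_prefix := PySem.Str.upper (pvGet params "filter" "")
  let filtered_vars :=
    if filter_prefix ≠ "" then
      filtered_vars.filter (fun kv => PySem.Str.startswith (PySem.Str.upper kv.1) filter_prefix)
    else filtered_vars
  let key_param := pvGet params "key" ""
  if key_param ≠ "" then filtered_vars.filter (fun kv => kv.1 == key_param)
  else filtered_vars

-- ===== PORT B =====
-- the inner helper 'keeps' of Source B (early-return chain)
def pvKeeps (search_term filter_prefix : String) (k v : String) : Bool :=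
  if (search_term ≠ "") && !PySem.Str.isIn search_term (PySem.Str.lower k)
      && !PySem.Str.isIn search_term (PySem.Str.lower v) then false
  else if (filter_prefix ≠ "") && !PySem.Str.startswith (PySem.Str.upper k) filter_prefix then false
  else true

def filter_env_vars_alt (env_vars : List (String × String)) (params : List (String × String)) : List (String × String) :=
  let search_term := PySem.Str.lower (pvGet params "search" "")
  let filter_prefix := PySem.Str.upper (pvGet params "filter" "")
  let key_param := pvGet params "key" ""
  if key_param ≠ "" then
    -- 'key_param in env_vars and keeps(key_param, env_vars[key_param])': one dict lookup
    match env_vars.find? (fun p => p.1 == key_param) with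
    | some p => if pvKeeps search_term filter_prefix key_param p.2 then [(key_param, p.2)] else []
    | none => []
  else
    env_vars.filter (fun kv => pvKeeps search_term filter_prefix kv.1 kv.2)

-- ===== PRECONDITION & SPEC =====
-- Pre_ excludes association lists whose env keys repeat: env_vars is a Python dict, which cannot
-- hold duplicate keys, and on such lists A's scan would keep every duplicate while B's direct
-- lookup takes the first — a representation corner no dict input reaches.
def Pre_filter_env_vars (env_vars : List (String × String)) (params : List (String × String)) : Prop :=
  (env_vars.map Prod.fst).Nodup
instance (env_vars : List (String × String)) (params : List (String × String)) : Decidable (Pre_filter_env_vars env_vars params) := by unfold Pre_filter_env_vars; infer_instance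

def pvWitness_filter_env_vars : (List (String × String)) × (List (String × String)) :=
  ([("PATH", "/bin"), ("HOME", "/root")], [("key", "PATH")])

def Spec_filter_env_vars (env_vars : List (String × String)) (params : List (String × String)) (out : List (String × String)) : Prop := out = filter_env_vars_alt env_vars params
instance (env_vars : List (String × String)) (params : List (String × String)) (out : List (String × String)) : Decidable (Spec_filter_env_vars env_vars params out) := by unfold Spec_filter_env_vars; infer_instance

-- ===== CLAIM (what is proved, stated in full; the proofs are below) =====
def Claim_equal_filter_env_vars : Prop := ∀ (env_vars : List (String × String)) (params : List (String × String)), Dom_filter_env_vars env_vars params → Pre_filter_env_vars env_vars params → Spec_filter_env_vars env_vars params (filter_env_vars env_vars params)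

-- ===== LEMMAS AND PROOFS =====

-- the early-return chain equals the fused guard conjunction
theorem pvKeeps_eq (s f k v : String) :
    pvKeeps s f k v =
      ((decide (s = "") || PySem.Str.isIn s (PySem.Str.lower k) || PySem.Str.isIn s (PySem.Str.lower v)) &&
       (decide (f = "") || PySem.Str.startswith (PySem.Str.upper k) f)) := by
  unfold pvKeeps
  by_cases hs : s = "" <;> by_cases hf : f = "" <;>
    cases ha : PySem.Str.isIn s (PySem.Str.lower k) <;>
    cases hb : PySem.Str.isIn s (PySem.Str.lower v) <;>
    cases hc : PySem.Str.startswith (PySem.Str.upper k) f <;>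
    simp [hs, hf]

-- on a list with nodup keys, filtering for one key equals a first-match lookup
theorem filter_key_eq_find (q : String → String → Bool) (key : String)
    (env : List (String × String)) (h : (env.map Prod.fst).Nodup) :
    env.filter (fun kv => q kv.1 kv.2 && (kv.1 == key)) =
      (match env.find? (fun p => p.1 == key) with
       | some p => if q key p.2 then [(key, p.2)] else []
       | none => []) := by
  induction env with
  | nil => simp
  | cons a t ih =>
    obtain ⟨a1, a2⟩ := a
    simp only [List.map_cons, List.nodup_cons] at h
    by_cases hk : a1 = key
    · subst hk
      have htail : t.filter (fun kv => q kv.1 kv.2 && (kv.1 == a1)) = [] := by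
        rw [List.filter_eq_nil_iff]
        intro b hb
        have hb1 : b.1 ≠ a1 := fun he => h.1 (by rw [← he]; exact List.mem_map.mpr ⟨b, hb, rfl⟩)
        simp [hb1]
      cases hq : q a1 a2 <;> simp [List.filter_cons, List.find?_cons, htail, hq]
    · have hne : (a1 == key) = false := by simp [hk]
      simp [List.filter_cons, List.find?_cons, hne, ih h.2]

theorem filter_env_core (s f key : String) (env : List (String × String))
    (hpre : (env.map Prod.fst).Nodup) :
    (let fv := env;
     let fv := if s ≠ "" then fv.filter (fun kv => PySem.Str.isIn s (PySem.Str.lower kv.1) || PySem.Str.isIn s (PySem.Str.lower kv.2)) else fv;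
     let fv := if f ≠ "" then fv.filter (fun kv => PySem.Str.startswith (PySem.Str.upper kv.1) f) else fv;
     if key ≠ "" then fv.filter (fun kv => kv.1 == key) else fv)
    = (if key ≠ "" then
        (match env.find? (fun p => p.1 == key) with
         | some p => if pvKeeps s f key p.2 then [(key, p.2)] else []
         | none => [])
       else env.filter (fun kv => pvKeeps s f kv.1 kv.2)) := by
  have hA : (let fv := env;
      let fv := if s ≠ "" then fv.filter (fun kv => PySem.Str.isIn s (PySem.Str.lower kv.1) || PySem.Str.isIn s (PySem.Str.lower kv.2)) else fv;
      if f ≠ "" then fv.filter (fun kv => PySem.Str.startswith (PySem.Str.upper kv.1) f) else fv)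
      = env.filter (fun kv => pvKeeps s f kv.1 kv.2) := by
    by_cases hs : s = "" <;> by_cases hf : f = "" <;>
      simp [hs, hf, List.filter_filter, pvKeeps_eq, Bool.and_comm]
  simp only at hA ⊢
  rw [hA]
  by_cases hk : key = ""
  · simp [hk]
  · rw [if_pos hk, if_pos hk, List.filter_filter]
    have hcomm : (fun a : String × String => (a.1 == key) && pvKeeps s f a.1 a.2)
        = (fun a : String × String => pvKeeps s f a.1 a.2 && (a.1 == key)) :=
      funext fun a => Bool.and_comm _ _
    rw [hcomm]
    exact filter_key_eq_find (fun k v => pvKeeps s f k v) key env hpre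

-- ===== VERDICT (by name: the statement is the Claim_ definition above) =====
theorem filter_env_vars_spec : Claim_equal_filter_env_vars := by
  intro env params _ hpre
  unfold Spec_filter_env_vars filter_env_vars filter_env_vars_alt
  exact filter_env_core (PySem.Str.lower (pvGet params "search" ""))
    (PySem.Str.upper (pvGet params "filter" "")) (pvGet params "key" "") env hpre
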